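-- pv_equiv track=rewrite | github.com/karishmatank/ls-core | py-110/other_practice/longest_vowel_substring.py | longest_vowel_substring
-- ===== SOURCE A (Python) =====
-- VOWELS = 'aeiou'
--
-- def is_all_vowels(substring):
--     for char in substring:
--         if char not in VOWELS:
--             return False
--     return True
--
-- def longest_vowel_substring(string):
--     valid_substrings = []
--     for idx_start in range(len(string)):
--         for idx_end in range(idx_start + 1, len(string) + 1):
--             substring = string[idx_start:idx_end]
--             if is_all_vowels(substring):
--                 valid_substrings.append(substring)
--
--     if not valid_substrings:
--         return 0
--
--     valid_substrings.sort(key=len, reverse=True)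
--     return len(valid_substrings[0])
-- ===== SOURCE B (Python) =====
-- VOWELS = 'aeiou'
--
-- def longest_vowel_substring(string):
--     # single pass: track current consecutive-vowel run and the best run seen
--     cur = 0
--     best = 0
--     for ch in string:
--         cur = cur + 1 if ch in VOWELS else 0
--         if cur > best:
--             best = cur
--     return best
-- ===== Notes on version B (the rewrite author's own statement) =====
-- stated objective: faster
-- what changed: replaced the enumerate-all-substrings + sort approach by a single pass that tracks the current and the maximal consecutive-vowel run length
import Mathlib
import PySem

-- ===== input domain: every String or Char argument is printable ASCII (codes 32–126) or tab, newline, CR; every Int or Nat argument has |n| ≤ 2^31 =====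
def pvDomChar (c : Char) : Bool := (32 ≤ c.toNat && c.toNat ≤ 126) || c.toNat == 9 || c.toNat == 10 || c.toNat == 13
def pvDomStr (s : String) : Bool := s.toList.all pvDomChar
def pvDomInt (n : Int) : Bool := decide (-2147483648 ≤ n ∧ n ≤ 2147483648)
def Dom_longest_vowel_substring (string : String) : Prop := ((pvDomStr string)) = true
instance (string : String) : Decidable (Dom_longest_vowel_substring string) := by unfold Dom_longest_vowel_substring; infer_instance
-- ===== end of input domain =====

-- B replaces A's enumerate-all-substrings-then-sort (O(n^3) substrings) by a single pass tracking
-- the current and maximal consecutive-vowel run; A's in-place sort touches only a local list.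

-- ===== PORT A =====
-- VOWELS = 'aeiou'; Python's `char not in VOWELS` on a single char is membership (exact here)
def pvVOWELS : List Char := ['a', 'e', 'i', 'o', 'u']

def pvIsAllVowels : List Char → Bool
  | [] => true
  | c :: t => if c ∈ pvVOWELS then pvIsAllVowels t else false

def longest_vowel_substring (string : String) : Int :=
  let l := string.toList
  let n : Int := l.length
  let valid : List (List Char) :=
    (PySem.List.pyRange 0 n 1).foldl (fun acc i =>
      (PySem.List.pyRange (i + 1) (n + 1) 1).foldl (fun acc j =>
        let sub := PySem.List.slice l (some i) (some j)
        if pvIsAllVowels sub then acc ++ [sub] else acc) acc) []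
  if valid = [] then 0
  else ((PySem.List.sorted valid (fun s => s.length) true).headI.length : Int)

-- ===== PORT B =====
def pvStep (p : Nat × Nat) (c : Char) : Nat × Nat :=
  let cur := if c ∈ pvVOWELS then p.1 + 1 else 0
  (cur, if p.2 < cur then cur else p.2)

def longest_vowel_substring_alt (string : String) : Int :=
  ((string.toList.foldl pvStep (0, 0)).2 : Int)

-- ===== PRECONDITION & SPEC =====
def Spec_longest_vowel_substring (string : String) (out : Int) : Prop := out = longest_vowel_substring_alt string
instance (string : String) (out : Int) : Decidable (Spec_longest_vowel_substring string out) := by unfold Spec_longest_vowel_substring; infer_instance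

-- ===== CLAIM (what is proved, stated in full; the proofs are below) =====
def Claim_equal_longest_vowel_substring : Prop := ∀ (string : String), Dom_longest_vowel_substring string → Spec_longest_vowel_substring string (longest_vowel_substring string)

-- ===== LEMMAS AND PROOFS =====

-- proof-side vocabulary: vowel test, longest all-vowel prefix, max all-vowel segment length
def pvIsV (c : Char) : Bool := c ∈ pvVOWELS

def pvPreRun (l : List Char) : Nat := (l.takeWhile pvIsV).length

def pvMBest : List Char → Nat
  | [] => 0
  | c :: t => max (pvPreRun (c :: t)) (pvMBest t)

-- bookkeeping value of B's fold with an arbitrary incoming run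
def pvF : Nat → List Char → Nat
  | _, [] => 0
  | cur, c :: t =>
    let cur' := if pvIsV c then cur + 1 else 0
    max cur' (pvF cur' t)

-- A's local substring list, let-reduced (definitionally A's loop)
def pvValid (l : List Char) : List (List Char) :=
  (PySem.List.pyRange 0 (l.length : Int) 1).foldl (fun acc i =>
    (PySem.List.pyRange (i + 1) ((l.length : Int) + 1) 1).foldl (fun acc j =>
      if pvIsAllVowels (PySem.List.slice l (some i) (some j))
      then acc ++ [PySem.List.slice l (some i) (some j)] else acc) acc) []

theorem A_unfold (s : String) :
    longest_vowel_substring s =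
      if pvValid s.toList = [] then 0
      else ((PySem.List.sorted (pvValid s.toList) (fun x => x.length) true).headI.length : Int) := by
  unfold longest_vowel_substring pvValid
  rfl

theorem pvIsAllVowels_iff (l : List Char) : pvIsAllVowels l = true ↔ ∀ c ∈ l, pvIsV c = true := by
  induction l with
  | nil => simp [pvIsAllVowels]
  | cons c t ih =>
    by_cases h : c ∈ pvVOWELS <;> simp [pvIsAllVowels, h, ih, pvIsV]

theorem pvPreRun_le_length (l : List Char) : pvPreRun l ≤ l.length :=
  (List.takeWhile_prefix pvIsV).length_le

theorem pvPreRun_le_mbest (l : List Char) : pvPreRun l ≤ pvMBest l := by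
  cases l with
  | nil => simp [pvPreRun, pvMBest]
  | cons c t => simp [pvMBest]

theorem pvPreRun_cons_pos (c : Char) (t : List Char) (h : pvIsV c = true) :
    pvPreRun (c :: t) = pvPreRun t + 1 := by
  simp [pvPreRun, h]

theorem pvPreRun_cons_zero (c : Char) (t : List Char) (h : ¬ pvIsV c = true) :
    pvPreRun (c :: t) = 0 := by
  simp [pvPreRun, h]

-- B's fold equals max of incoming best and pvF
theorem foldl_step_snd (l : List Char) : ∀ cur best,
    (l.foldl pvStep (cur, best)).2 = max best (pvF cur l) := by
  induction l with
  | nil => intro cur best; simp [pvF]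
  | cons c t ih =>
    intro cur best
    rw [List.foldl_cons]
    by_cases h : pvIsV c = true
    · have hs : pvStep (cur, best) c = (cur + 1, if best < cur + 1 then cur + 1 else best) := by
        simp [pvStep, pvIsV] at h ⊢; simp [h]
      have hf : pvF cur (c :: t) = max (cur + 1) (pvF (cur + 1) t) := by
        simp [pvF, h]
      rw [hs, hf, ih]
      split <;> omega
    · have hs : pvStep (cur, best) c = (0, best) := by
        simp [pvStep, pvIsV] at h ⊢; simp [h]
      have hf : pvF cur (c :: t) = max 0 (pvF 0 t) := by
        simp [pvF, h]
      rw [hs, hf, ih]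
      omega

-- pvF against the structural spec
theorem pvF_eq (l : List Char) : ∀ cur,
    pvF cur l = if 0 < pvPreRun l then max (pvMBest l) (cur + pvPreRun l) else pvMBest l := by
  induction l with
  | nil => intro cur; simp [pvF, pvPreRun, pvMBest]
  | cons c t ih =>
    intro cur
    have hmt := pvPreRun_le_mbest t
    by_cases h : pvIsV c = true
    · have hpre := pvPreRun_cons_pos c t h
      have hmb : pvMBest (c :: t) = max (pvPreRun t + 1) (pvMBest t) := by
        rw [pvMBest, hpre]
      have hf : pvF cur (c :: t) = max (cur + 1) (pvF (cur + 1) t) := by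
        simp [pvF, h]
      rw [hf, ih (cur + 1), hpre, hmb]
      by_cases h0 : 0 < pvPreRun t
      · rw [if_pos h0, if_pos (by omega)]; omega
      · rw [if_neg h0, if_pos (by omega)]; omega
    · have hpre := pvPreRun_cons_zero c t h
      have hmb : pvMBest (c :: t) = pvMBest t := by
        rw [pvMBest, hpre]; omega
      have hf : pvF cur (c :: t) = max 0 (pvF 0 t) := by
        simp [pvF, h]
      rw [hf, ih 0, hpre, hmb]
      by_cases h0 : 0 < pvPreRun t
      · rw [if_pos h0, if_neg (by omega)]; omega
      · rw [if_neg h0, if_neg (by omega)]; omega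

theorem B_eq_mbest (l : List Char) : (l.foldl pvStep (0, 0)).2 = pvMBest l := by
  rw [foldl_step_snd, pvF_eq]
  have := pvPreRun_le_mbest l
  split <;> omega

-- every all-vowel prefix is at most the vowel prefix run
theorem prefix_le_preRun (l : List Char) : ∀ k, k ≤ l.length →
    pvIsAllVowels (l.take k) = true → k ≤ pvPreRun l := by
  induction l with
  | nil => intro k hk _; simp at hk; simp [hk]
  | cons c t ih =>
    intro k hk hv
    cases k with
    | zero => exact Nat.zero_le _
    | succ k =>
      simp only [List.take_succ_cons] at hv
      rw [pvIsAllVowels_iff] at hv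
      have hc : pvIsV c = true := hv c (by simp)
      have ht : pvIsAllVowels (t.take k) = true := by
        rw [pvIsAllVowels_iff]; intro x hx; exact hv x (by simp [hx])
      have := ih k (by simp at hk; omega) ht
      rw [pvPreRun_cons_pos c t hc]
      omega

-- and conversely any prefix within the vowel run is all vowels
theorem take_preRun_allV (l : List Char) : ∀ k, k ≤ pvPreRun l →
    pvIsAllVowels (l.take k) = true := by
  induction l with
  | nil => intro k hk; simp [pvPreRun] at hk; simp [hk, pvIsAllVowels]
  | cons c t ih =>
    intro k hk
    cases k with
    | zero => simp [pvIsAllVowels]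
    | succ k =>
      by_cases h : pvIsV c = true
      · rw [pvPreRun_cons_pos c t h] at hk
        have := ih k (by omega)
        simp only [List.take_succ_cons, pvIsAllVowels]
        have hc : c ∈ pvVOWELS := by simpa [pvIsV] using h
        rw [if_pos hc]; exact this
      · rw [pvPreRun_cons_zero c t h] at hk; omega

-- upper bound: any all-vowel segment has length ≤ pvMBest
theorem seg_le_mbest (l : List Char) : ∀ a k, a + k ≤ l.length →
    pvIsAllVowels ((l.drop a).take k) = true → k ≤ pvMBest l := by
  induction l with
  | nil => intro a k h _; simp at h; simp [h, pvMBest]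
  | cons c t ih =>
    intro a k h hv
    cases a with
    | zero =>
      simp only [List.drop_zero] at hv
      calc k ≤ pvPreRun (c :: t) := prefix_le_preRun _ k (by simpa using h) hv
        _ ≤ pvMBest (c :: t) := pvPreRun_le_mbest _
    | succ a =>
      have ha : a + k ≤ t.length := by simp at h; omega
      calc k ≤ pvMBest t := ih a k ha (by simpa using hv)
        _ ≤ pvMBest (c :: t) := by simp [pvMBest]

-- achievement: pvMBest is 0 or realised by an all-vowel segment
theorem mbest_achieved (l : List Char) : pvMBest l = 0 ∨
    ∃ a, a + pvMBest l ≤ l.length ∧ pvIsAllVowels ((l.drop a).take (pvMBest l)) = true := by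
  induction l with
  | nil => left; rfl
  | cons c t ih =>
    by_cases hle : pvMBest (c :: t) = pvMBest t
    · rcases ih with h0 | ⟨a, ha, hv⟩
      · by_cases hz : pvMBest (c :: t) = 0
        · left; exact hz
        · omega
      · right
        exact ⟨a + 1, by simp; omega, by simpa [hle] using hv⟩
    · have hmb : pvMBest (c :: t) = max (pvPreRun (c :: t)) (pvMBest t) := rfl
      have hpr : pvMBest (c :: t) = pvPreRun (c :: t) := by omega
      right
      refine ⟨0, by simpa [hpr] using pvPreRun_le_length (c :: t), ?_⟩
      rw [List.drop_zero, hpr]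
      exact take_preRun_allV (c :: t) _ (by omega)

-- characterisation of A's valid-substring list
theorem mem_valid_iff (l : List Char) (sub : List Char) :
    sub ∈ pvValid l ↔
    ∃ i j : Int, (0 ≤ i ∧ i < l.length) ∧ (i + 1 ≤ j ∧ j < (l.length : Int) + 1) ∧
      pvIsAllVowels (PySem.List.slice l (some i) (some j)) = true ∧
      sub = PySem.List.slice l (some i) (some j) := by
  unfold pvValid
  have h1 := PySem.List.foldl_congr_mem (PySem.List.pyRange 0 (l.length : Int) 1)
      (fun acc i =>
        (PySem.List.pyRange (i + 1) ((l.length : Int) + 1) 1).foldl (fun acc j =>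
          if pvIsAllVowels (PySem.List.slice l (some i) (some j))
          then acc ++ [PySem.List.slice l (some i) (some j)] else acc) acc)
      (fun acc i =>
        acc ++ (((PySem.List.pyRange (i + 1) ((l.length : Int) + 1) 1).filter
          (fun j => pvIsAllVowels (PySem.List.slice l (some i) (some j)))).map
          (fun j => PySem.List.slice l (some i) (some j))))
      ([])
      (by intro acc i _; exact PySem.List.foldl_append_if _ _ _ _)
  rw [h1, PySem.List.foldl_append_eq_flatMap]
  simp only [List.nil_append, List.mem_flatMap, List.mem_map, List.mem_filter,
    PySem.List.mem_pyRange_one]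
  constructor
  · rintro ⟨i, hi, j, ⟨hj, hv⟩, hsub⟩
    exact ⟨i, j, hi, hj, hv, hsub.symm⟩
  · rintro ⟨i, j, hi, hj, hv, hsub⟩
    exact ⟨i, hi, j, ⟨hj, hv⟩, hsub.symm⟩

-- the achieved segment is an element of pvValid
theorem achieved_mem (l : List Char) (a k : Nat) (hk : 0 < k) (ha : a + k ≤ l.length)
    (hv : pvIsAllVowels ((l.drop a).take k) = true) : (l.drop a).take k ∈ pvValid l := by
  rw [mem_valid_iff]
  refine ⟨(a : Int), ((a + k : Nat) : Int), ⟨Int.natCast_nonneg a, ?_⟩, ⟨?_, ?_⟩, ?_, ?_⟩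
  · exact_mod_cast (by omega : a < l.length)
  · exact_mod_cast (by omega : a + 1 ≤ a + k)
  · exact_mod_cast (by omega : a + k < l.length + 1)
  · rw [PySem.List.slice_natCast l a (a + k)]
    simpa [Nat.add_sub_cancel_left] using hv
  · rw [PySem.List.slice_natCast l a (a + k)]
    simp

-- elements of pvValid are bounded by pvMBest
theorem valid_le_mbest (l : List Char) (sub : List Char) (hsub : sub ∈ pvValid l) :
    sub.length ≤ pvMBest l := by
  rw [mem_valid_iff] at hsub
  obtain ⟨i, j, ⟨hi0, hin⟩, ⟨hij, hjn⟩, hv, hse⟩ := hsub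
  have hj0 : (0 : Int) ≤ j := by omega
  rw [PySem.List.slice_toNat l hi0 hj0] at hse hv
  have hha : i.toNat + (j.toNat - i.toNat) ≤ l.length := by omega
  have hlen : sub.length = j.toNat - i.toNat := by
    rw [hse]; simp; omega
  rw [hlen]
  exact seg_le_mbest l i.toNat (j.toNat - i.toNat) hha hv

-- main list-level equality: A's core equals pvMBest
theorem A_eq_mbest (s : String) :
    longest_vowel_substring s = (pvMBest s.toList : Int) := by
  rw [A_unfold]
  set l := s.toList with hl
  by_cases hne : pvValid l = []
  · rw [if_pos hne]
    rcases mbest_achieved l with h0 | ⟨a, ha, hv⟩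
    · rw [h0]; rfl
    · by_cases hm0 : pvMBest l = 0
      · rw [hm0]; rfl
      · exfalso
        have := achieved_mem l a (pvMBest l) (by omega) ha hv
        rw [hne] at this; simp at this
  · rw [if_neg hne]
    have hsne : PySem.List.sorted (pvValid l) (fun s => s.length) true ≠ [] := by
      intro h; exact hne ((PySem.List.sorted_eq_nil_iff _ _ _).mp h)
    obtain ⟨m, t, hmt⟩ := List.exists_cons_of_ne_nil hsne
    rw [hmt]; simp only [List.headI]
    have hmmem : m ∈ pvValid l := by
      have : m ∈ PySem.List.sorted (pvValid l) (fun s => s.length) true := by rw [hmt]; simp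
      exact (PySem.List.mem_sorted _ _ _ _).mp this
    have hmle : m.length ≤ pvMBest l := valid_le_mbest l m hmmem
    have hge : pvMBest l ≤ m.length := by
      rcases mbest_achieved l with h0 | ⟨a, ha, hv⟩
      · omega
      · by_cases hm0 : pvMBest l = 0
        · omega
        · have hmem := achieved_mem l a (pvMBest l) (by omega) ha hv
          have hkey := PySem.List.key_head_sorted_rev_ge (xs := pvValid l)
            (key := fun s => s.length) hmt _ hmem
          have hlen : ((l.drop a).take (pvMBest l)).length = pvMBest l := by simp; omega
          simpa [hlen] using hkey
    exact_mod_cast (by omega : m.length = pvMBest l)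

-- ===== VERDICT (by name: the statement is the Claim_ definition above) =====
theorem longest_vowel_substring_spec : Claim_equal_longest_vowel_substring := by
  intro s _
  unfold Spec_longest_vowel_substring longest_vowel_substring_alt
  rw [B_eq_mbest]
  exact A_eq_mbest s
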